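-- pv_equiv track=rewrite | github.com/thingk0/Algorithm | 프로그래머스/2/159993. 미로 탈출/미로 탈출.py | solution
-- ===== SOURCE A (Python) =====
-- from collections import deque
--
-- def solution(maps):
--     n, m = len(maps), len(maps[0])
--     visited = [[[False for _ in range(2)] for _ in range(m)] for _ in range(n)]
--     q = deque()
--
--     start_y, start_x = -1, -1
--     end_y, end_x = -1, -1
--
--     for i in range(n):
--         for j in range(m):
--             if maps[i][j] == 'S':
--                 start_y, start_x = i, j
--             elif maps[i][j] == 'E':
--                 end_y, end_x = i, j
--
--     if start_y == -1 or end_y == -1: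
--         return -1
--
--     q.append((start_y, start_x, 0, 0))
--     visited[start_y][start_x][0] = True
--
--     while q:
--         y, x, lever_state, time = q.popleft()
--
--         if y == end_y and x == end_x and lever_state == 1:
--             return time
--
--         for dy, dx in [(-1, 0), (1, 0), (0, -1), (0, 1)]:
--             ny, nx = y + dy, x + dx
--
--             if not (0 <= ny < n and 0 <= nx < m) or maps[ny][nx] == 'X':
--                 continue
--
--             next_lever_state = 1 if maps[ny][nx] == 'L' or lever_state == 1 else 0
--
--             if not visited[ny][nx][next_lever_state]:
--                 visited[ny][nx][next_lever_state] = True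
--                 q.append((ny, nx, next_lever_state, time + 1))
--
--     return -1
-- ===== SOURCE B (Python) =====
-- def solution(maps):
--     # Bellman-Ford-style relaxation over (y, x, lever) states: keep a distance
--     # map and sweep over all known states until no new state appears.
--     # Distances only ever get set once (at their final value), so the map
--     # stops growing exactly when it has stabilised.
--     n, m = len(maps), len(maps[0])
--     ss = [(i, j) for i in range(n) for j in range(m) if maps[i][j] == 'S']
--     es = [(i, j) for i in range(n) for j in range(m) if maps[i][j] == 'E']
--     if not ss or not es:
--         return -1
--     sy, sx = ss[-1]
--     ey, ex = es[-1]
--     dist = {(sy, sx, 0): 0}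
--     while True:
--         new = dict(dist)
--         for (y, x, l), dv in dist.items():
--             for dy, dx in ((-1, 0), (1, 0), (0, -1), (0, 1)):
--                 ny, nx = y + dy, x + dx
--                 if 0 <= ny < n and 0 <= nx < m and maps[ny][nx] != 'X':
--                     nl = 1 if maps[ny][nx] == 'L' or l == 1 else 0
--                     if (ny, nx, nl) not in new or new[(ny, nx, nl)] > dv + 1:
--                         new[(ny, nx, nl)] = dv + 1
--         if len(new) == len(dist):
--             break
--         dist = new
--     return dist.get((ey, ex, 1), -1)
-- ===== Notes on version B (the rewrite author's own statement) =====
-- stated objective: alternative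
-- what changed: A runs a deque BFS over timed (y,x,lever) states with a preallocated 3D visited array and returns the time when it pops the exit-with-lever state; B keeps a dictionary of tentative distances and repeatedly relaxes EVERY known state over the four moves (Bellman-Ford-style synchronous sweeps, no queue and no frontier) until the map stops growing, then reads off the distance of (E,1) with -1 as default.
import Mathlib
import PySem

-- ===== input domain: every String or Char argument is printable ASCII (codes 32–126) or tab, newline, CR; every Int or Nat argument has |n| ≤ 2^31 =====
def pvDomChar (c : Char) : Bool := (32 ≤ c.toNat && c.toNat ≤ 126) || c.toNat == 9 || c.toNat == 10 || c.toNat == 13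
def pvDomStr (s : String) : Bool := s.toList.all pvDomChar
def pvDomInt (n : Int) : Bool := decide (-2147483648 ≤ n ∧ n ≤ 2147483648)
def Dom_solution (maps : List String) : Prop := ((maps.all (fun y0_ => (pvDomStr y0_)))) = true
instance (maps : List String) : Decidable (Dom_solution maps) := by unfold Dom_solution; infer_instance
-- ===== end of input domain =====

-- B replaces A's deque BFS over timed (y,x,lever) states by Bellman-Ford-style
-- relaxation sweeps of a distance dictionary until it stops growing; objective: alternative.

-- maps[i][j] as a total function (both Pythons only evaluate it where it cannot raise
-- inside Pre_solution; the default is never reached there)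
def pvCell (maps : List String) (i j : Int) : Char :=
  ((PySem.List.pyGet? maps i).bind (fun r => PySem.Str.pyGet? r j)).getD ' '

def pvDirs : List (Int × Int) := [(-1, 0), (1, 0), (0, -1), (0, 1)]

abbrev pvSt := Int × Int × Int

-- finite universe of (y, x, lever) states; used only by the termination measures
def pvAll (n m : Int) : List pvSt :=
  (PySem.List.pyRange 0 n 1).flatMap (fun i =>
    (PySem.List.pyRange 0 m 1).flatMap (fun j => [(i, j, 0), (i, j, 1)]))

theorem pvFilter_length_le {α : Type} (t : List α) (p q : α → Bool)
    (h : ∀ z, q z = true → p z = true) : (t.filter q).length ≤ (t.filter p).length := by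
  induction t with
  | nil => simp
  | cons a s ih =>
    by_cases hq : q a = true
    · simp [hq, h a hq]; omega
    · simp only [Bool.not_eq_true] at hq
      simp only [List.filter_cons, hq]
      by_cases hp : p a = true <;> simp [hp] <;> omega

-- termination helper: a state newly covered shrinks the uncovered part
theorem pvFilter_length_lt {α : Type} (l : List α) (p q : α → Bool)
    (himp : ∀ z, q z = true → p z = true) (s : α) :
    s ∈ l → p s = true → q s = false → (l.filter q).length < (l.filter p).length := by
  induction l with
  | nil => intro h _ _; cases h
  | cons a t ih =>
    intro hs hp hq
    rw [List.mem_cons] at hs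
    rcases hs with hs | hs
    · subst hs
      simp only [List.filter_cons, hp, hq]
      calc (t.filter q).length ≤ (t.filter p).length := pvFilter_length_le t p q himp
        _ < (t.filter p).length + 1 := Nat.lt_succ_self _
    · by_cases ha : q a = true
      · have hpa := himp a ha
        simp only [List.filter_cons, ha, hpa]
        simpa using Nat.succ_lt_succ (ih hs hp hq)
      · simp only [List.filter_cons, Bool.not_eq_true] at *
        rw [ha]
        by_cases hpa : p a = true
        · simp only [hpa]
          exact Nat.lt_succ_of_lt (ih hs hp hq)
        · simp only [Bool.not_eq_true] at hpa
          rw [hpa]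
          exact ih hs hp hq

-- ===== PORT A =====

-- the S/E scan of A (nested for-loops, last occurrence wins)
def pvScanA (maps : List String) (n m : Int) : (Int × Int) × (Int × Int) :=
  (PySem.List.pyRange 0 n 1).foldl (fun st i =>
    (PySem.List.pyRange 0 m 1).foldl (fun st2 j =>
      if pvCell maps i j = 'S' then ((i, j), st2.2)
      else if pvCell maps i j = 'E' then (st2.1, (i, j)) else st2) st)
    ((-1, -1), (-1, -1))

-- visited[ny][nx][nl] = True  (the 3D bool array as a function)
def pvMark (v : Int → Int → Int → Bool) (a b c : Int) : Int → Int → Int → Bool :=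
  fun p q r => if p = a ∧ q = b ∧ r = c then true else v p q r

-- one neighbour step of A's inner `for dy, dx in …` loop
def pvStepA (maps : List String) (n m y x l t : Int)
    (st : List (Int × Int × Int × Int) × (Int → Int → Int → Bool)) (d : Int × Int) :
    List (Int × Int × Int × Int) × (Int → Int → Int → Bool) :=
  if ((0 ≤ y + d.1 ∧ y + d.1 < n ∧ 0 ≤ x + d.2 ∧ x + d.2 < m) ∧ pvCell maps (y + d.1) (x + d.2) ≠ 'X') then
    if st.2 (y + d.1) (x + d.2) (if pvCell maps (y + d.1) (x + d.2) = 'L' ∨ l = 1 then 1 else 0) then st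
    else (st.1 ++ [(y + d.1, x + d.2, (if pvCell maps (y + d.1) (x + d.2) = 'L' ∨ l = 1 then (1:Int) else 0), t + 1)],
          pvMark st.2 (y + d.1) (x + d.2) (if pvCell maps (y + d.1) (x + d.2) = 'L' ∨ l = 1 then 1 else 0))
  else st

def pvRemA (n m : Int) (vis : Int → Int → Int → Bool) : Nat :=
  ((pvAll n m).filter (fun s => !(vis s.1 s.2.1 s.2.2))).length

-- termination: marking an unvisited in-bounds state shrinks the unvisited part
theorem pvRemA_mark_lt (n m a b c : Int) (v : Int → Int → Int → Bool)
    (hmem : (a, b, c) ∈ pvAll n m) (hv : v a b c = false) :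
    pvRemA n m (pvMark v a b c) < pvRemA n m v := by
  apply pvFilter_length_lt (pvAll n m)
      (fun s => !(v s.1 s.2.1 s.2.2)) (fun s => !(pvMark v a b c s.1 s.2.1 s.2.2))
      ?_ (a, b, c) hmem (by simp [hv]) (by simp [pvMark])
  intro z hz
  by_cases h : z.1 = a ∧ z.2.1 = b ∧ z.2.2 = c
  · exfalso; simp [pvMark, h] at hz
  · simpa [pvMark, h] using hz

theorem pvStepA_meas (maps : List String) (n m y x l t : Int)
    (st : List (Int × Int × Int × Int) × (Int → Int → Int → Bool)) (d : Int × Int) :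
    2 * pvRemA n m (pvStepA maps n m y x l t st d).2 + (pvStepA maps n m y x l t st d).1.length
      ≤ 2 * pvRemA n m st.2 + st.1.length := by
  by_cases hok : ((0 ≤ y + d.1 ∧ y + d.1 < n ∧ 0 ≤ x + d.2 ∧ x + d.2 < m) ∧
      pvCell maps (y + d.1) (x + d.2) ≠ 'X')
  case neg => simp [pvStepA, hok]
  case pos =>
    by_cases hvis : st.2 (y + d.1) (x + d.2)
        (if pvCell maps (y + d.1) (x + d.2) = 'L' ∨ l = 1 then 1 else 0) = true
    case pos => simp [pvStepA, hok, hvis]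
    case neg =>
      simp only [pvStepA, if_pos hok, if_neg hvis]
      have hmem : (y + d.1, x + d.2,
          (if pvCell maps (y + d.1) (x + d.2) = 'L' ∨ l = 1 then (1:Int) else 0)) ∈ pvAll n m := by
        obtain ⟨⟨h1, h2, h3, h4⟩, -⟩ := hok
        simp only [pvAll, List.mem_flatMap, PySem.List.mem_pyRange_one]
        refine ⟨y + d.1, ⟨h1, h2⟩, x + d.2, ⟨h3, h4⟩, ?_⟩
        split <;> simp
      have hv : st.2 (y + d.1) (x + d.2)
          (if pvCell maps (y + d.1) (x + d.2) = 'L' ∨ l = 1 then (1:Int) else 0) = false :=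
        Bool.not_eq_true _ |>.mp hvis
      have hlt := pvRemA_mark_lt n m (y + d.1) (x + d.2)
          (if pvCell maps (y + d.1) (x + d.2) = 'L' ∨ l = 1 then (1:Int) else 0) st.2 hmem hv
      simp only [List.length_append, List.length_cons, List.length_nil]
      omega

theorem pvFoldA_meas (maps : List String) (n m y x l t : Int) (ds : List (Int × Int)) :
    ∀ st : List (Int × Int × Int × Int) × (Int → Int → Int → Bool),
    2 * pvRemA n m (ds.foldl (pvStepA maps n m y x l t) st).2
        + (ds.foldl (pvStepA maps n m y x l t) st).1.length
      ≤ 2 * pvRemA n m st.2 + st.1.length := by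
  induction ds with
  | nil => intro st; simp
  | cons d ds ih =>
    intro st
    calc _ ≤ 2 * pvRemA n m (pvStepA maps n m y x l t st d).2
              + (pvStepA maps n m y x l t st d).1.length := ih _
      _ ≤ _ := pvStepA_meas maps n m y x l t st d

-- A's BFS loop over the deque of (y, x, lever, time)
def pvBfsA (maps : List String) (n m ey ex : Int)
    (q : List (Int × Int × Int × Int)) (vis : Int → Int → Int → Bool) : Int :=
  match q with
  | [] => -1
  | (y, x, l, t) :: rest =>
    if y = ey ∧ x = ex ∧ l = 1 then t
    else
      pvBfsA maps n m ey ex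
        (pvDirs.foldl (pvStepA maps n m y x l t) (rest, vis)).1
        (pvDirs.foldl (pvStepA maps n m y x l t) (rest, vis)).2
termination_by 2 * pvRemA n m vis + q.length
decreasing_by
  have h := pvFoldA_meas maps n m y x l t pvDirs (rest, vis)
  dsimp only at h
  simp only [List.length_cons]
  omega

def solution (maps : List String) : Int :=
  let n : Int := (maps.length : Int)
  let m : Int := PySem.Str.len ((PySem.List.pyGet? maps 0).getD "")
  let sc := pvScanA maps n m
  if sc.1.1 = -1 ∨ sc.2.1 = -1 then -1
  else pvBfsA maps n m sc.2.1 sc.2.2 [(sc.1.1, sc.1.2, 0, 0)]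
        (pvMark (fun _ _ _ => false) sc.1.1 sc.1.2 0)

-- ===== PORT B =====

-- [(i, j) for i in range(n) for j in range(m) if maps[i][j] == c]
def pvFindAll (maps : List String) (n m : Int) (c : Char) : List (Int × Int) :=
  (PySem.List.pyRange 0 n 1).flatMap (fun i =>
    (PySem.List.pyRange 0 m 1).filterMap (fun j =>
      if pvCell maps i j = c then some (i, j) else none))

-- one relaxation of one move from the known state (y, x, l) with distance dv
def pvStepR (maps : List String) (n m y x l dv : Int)
    (new : PySem.Dict pvSt Int) (d : Int × Int) : PySem.Dict pvSt Int :=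
  if ((0 ≤ y + d.1 ∧ y + d.1 < n ∧ 0 ≤ x + d.2 ∧ x + d.2 < m) ∧ pvCell maps (y + d.1) (x + d.2) ≠ 'X') then
    match new.get? (y + d.1, x + d.2, (if pvCell maps (y + d.1) (x + d.2) = 'L' ∨ l = 1 then (1:Int) else 0)) with
    | none => new.insert (y + d.1, x + d.2, (if pvCell maps (y + d.1) (x + d.2) = 'L' ∨ l = 1 then (1:Int) else 0)) (dv + 1)
    | some c => if c > dv + 1 then
        new.insert (y + d.1, x + d.2, (if pvCell maps (y + d.1) (x + d.2) = 'L' ∨ l = 1 then (1:Int) else 0)) (dv + 1)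
      else new
  else new

-- one whole sweep: `new = dict(dist); for (y,x,l), dv in dist.items(): for dy,dx in …`
def pvRelax (maps : List String) (n m : Int) (dist : PySem.Dict pvSt Int) : PySem.Dict pvSt Int :=
  dist.items.foldl (fun new p => pvDirs.foldl (pvStepR maps n m p.1.1 p.1.2.1 p.1.2.2 p.2) new) dist

def pvRemD (n m : Int) (dist : PySem.Dict pvSt Int) : Nat :=
  ((pvAll n m).filter (fun s => !(dist.contains s))).length

-- termination facts for the sweep loop (the sweep only ever ADDS keys, all in bounds)
theorem pvStepR_mono (maps : List String) (n m y x l dv : Int)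
    (new : PySem.Dict pvSt Int) (d : Int × Int) (k : pvSt)
    (h : new.contains k = true) : (pvStepR maps n m y x l dv new d).contains k = true := by
  unfold pvStepR
  split
  · split
    · simp [PySem.Dict.contains_insert, h]
    · split
      · simp [PySem.Dict.contains_insert, h]
      · exact h
  · exact h

theorem pvFold_mono {α : Type} (step : PySem.Dict pvSt Int → α → PySem.Dict pvSt Int)
    (hmono : ∀ acc a k, acc.contains k = true → (step acc a).contains k = true)
    (l : List α) : ∀ (acc : PySem.Dict pvSt Int) (k : pvSt),
      acc.contains k = true → (l.foldl step acc).contains k = true := by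
  induction l with
  | nil => intro acc k h; exact h
  | cons a t ih => intro acc k h; exact ih (step acc a) k (hmono acc a k h)

theorem pvStepR_tri (maps : List String) (n m y x l dv : Int)
    (new : PySem.Dict pvSt Int) (d : Int × Int) :
    ((∀ k, (pvStepR maps n m y x l dv new d).contains k = new.contains k) ∧
      (pvStepR maps n m y x l dv new d).size = new.size)
    ∨ ∃ k, k ∈ pvAll n m ∧ new.contains k = false ∧
        (pvStepR maps n m y x l dv new d).contains k = true := by
  unfold pvStepR
  split
  case isTrue hok =>
    set w : pvSt := (y + d.1, x + d.2,
      (if pvCell maps (y + d.1) (x + d.2) = 'L' ∨ l = 1 then (1:Int) else 0)) with hw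
    have hwall : w ∈ pvAll n m := by
      obtain ⟨⟨h1, h2, h3, h4⟩, -⟩ := hok
      simp only [hw, pvAll, List.mem_flatMap, PySem.List.mem_pyRange_one]
      refine ⟨y + d.1, ⟨h1, h2⟩, x + d.2, ⟨h3, h4⟩, ?_⟩
      split <;> simp
    cases hg : new.get? w with
    | none =>
      dsimp only
      right
      refine ⟨w, hwall, ?_, ?_⟩
      · rw [PySem.Dict.contains_eq_isSome_get?, hg]; rfl
      · simp [PySem.Dict.contains_insert]
    | some c =>
      have hc : new.contains w = true := by
        rw [PySem.Dict.contains_eq_isSome_get?, hg]; rfl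
      dsimp only
      by_cases hcmp : c > dv + 1
      · rw [if_pos hcmp]
        left
        constructor
        · intro k
          rw [PySem.Dict.contains_insert]
          by_cases hk : k = w
          · subst hk; simp [hc]
          · simp [hk]
        · rw [PySem.Dict.size_insert, if_pos hc]
      · rw [if_neg hcmp]
        left; exact ⟨fun _ => rfl, rfl⟩
  case isFalse => left; exact ⟨fun _ => rfl, rfl⟩

theorem pvFold_tri {α : Type} (step : PySem.Dict pvSt Int → α → PySem.Dict pvSt Int) (n m : Int)
    (hmono : ∀ acc a k, acc.contains k = true → (step acc a).contains k = true)
    (htri : ∀ acc a, ((∀ k, (step acc a).contains k = acc.contains k) ∧ (step acc a).size = acc.size)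
        ∨ ∃ k, k ∈ pvAll n m ∧ acc.contains k = false ∧ (step acc a).contains k = true)
    (l : List α) : ∀ (acc : PySem.Dict pvSt Int),
      ((∀ k, (l.foldl step acc).contains k = acc.contains k) ∧ (l.foldl step acc).size = acc.size)
      ∨ ∃ k, k ∈ pvAll n m ∧ acc.contains k = false ∧ (l.foldl step acc).contains k = true := by
  induction l with
  | nil => intro acc; left; exact ⟨fun _ => rfl, rfl⟩
  | cons a t ih =>
    intro acc
    rcases htri acc a with ⟨hceq, hseq⟩ | ⟨k, hkall, hkf, hkt⟩
    · rcases ih (step acc a) with ⟨hceq', hseq'⟩ | ⟨k, hkall, hkf, hkt⟩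
      · left
        exact ⟨fun k => (hceq' k).trans (hceq k), by rw [List.foldl_cons, hseq', hseq]⟩
      · right
        exact ⟨k, hkall, by rw [← hceq k]; exact hkf, hkt⟩
    · right
      refine ⟨k, hkall, hkf, ?_⟩
      exact pvFold_mono step hmono t (step acc a) k hkt

theorem pvRelax_tri (maps : List String) (n m : Int) (dist : PySem.Dict pvSt Int) :
    ((∀ k, (pvRelax maps n m dist).contains k = dist.contains k) ∧
      (pvRelax maps n m dist).size = dist.size)
    ∨ ∃ k, k ∈ pvAll n m ∧ dist.contains k = false ∧ (pvRelax maps n m dist).contains k = true := by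
  unfold pvRelax
  exact pvFold_tri _ n m
    (fun acc p k h => pvFold_mono _ (fun a d k h => pvStepR_mono maps n m _ _ _ _ a d k h)
      pvDirs acc k h)
    (fun acc p => pvFold_tri _ n m (fun a d k h => pvStepR_mono maps n m _ _ _ _ a d k h)
      (fun a d => pvStepR_tri maps n m _ _ _ _ a d) pvDirs acc)
    dist.items dist

theorem pvRelax_mono (maps : List String) (n m : Int) (dist : PySem.Dict pvSt Int) (k : pvSt)
    (h : dist.contains k = true) : (pvRelax maps n m dist).contains k = true := by
  unfold pvRelax
  exact pvFold_mono _
    (fun acc p k h => pvFold_mono _ (fun a d k h => pvStepR_mono maps n m _ _ _ _ a d k h)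
      pvDirs acc k h) dist.items dist k h

-- the `while True` sweep loop
def pvLoopB (maps : List String) (n m : Int) (dist : PySem.Dict pvSt Int) : PySem.Dict pvSt Int :=
  if (pvRelax maps n m dist).size = dist.size then dist
  else pvLoopB maps n m (pvRelax maps n m dist)
termination_by pvRemD n m dist
decreasing_by
  rcases pvRelax_tri maps n m dist with ⟨-, hseq⟩ | ⟨k, hkall, hkf, hkt⟩
  · exact absurd hseq (by assumption)
  · apply pvFilter_length_lt (pvAll n m)
      (fun s => !(dist.contains s)) (fun s => !((pvRelax maps n m dist).contains s))
      ?_ k hkall (by simp [hkf]) (by simp [hkt])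
    intro z hz
    simp only [Bool.not_eq_true'] at hz ⊢
    cases hc : dist.contains z with
    | false => rfl
    | true => exact absurd (pvRelax_mono maps n m dist z hc) (by simp [hz])

def solution_alt (maps : List String) : Int :=
  let n : Int := (maps.length : Int)
  let m : Int := PySem.Str.len ((PySem.List.pyGet? maps 0).getD "")
  let ss := pvFindAll maps n m 'S'
  let es := pvFindAll maps n m 'E'
  if ss = [] ∨ es = [] then -1
  else
    let s := ss.getLastD (-1, -1)
    let e := es.getLastD (-1, -1)
    (pvLoopB maps n m (PySem.Dict.empty.insert (s.1, s.2, 0) 0)).getD (e.1, e.2, 1) (-1)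

-- ===== PRECONDITION & SPEC =====
-- Pre_solution excludes exactly the inputs on which the Python A raises IndexError:
-- the empty list (maps[0]) and grids with a row shorter than row 0 (maps[i][j], j < len(maps[0])).
def Pre_solution (maps : List String) : Prop :=
  maps ≠ [] ∧ ∀ s ∈ maps, ((maps.headD "").toList.length : Int) ≤ (s.toList.length : Int)
instance (maps : List String) : Decidable (Pre_solution maps) := by unfold Pre_solution; infer_instance

def pvWitness_solution : List String := ["SL", "LE"]

def Spec_solution (maps : List String) (out : Int) : Prop := out = solution_alt maps
instance (maps : List String) (out : Int) : Decidable (Spec_solution maps out) := by unfold Spec_solution; infer_instance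

-- ===== CLAIM (what is proved, stated in full; the proofs are below) =====
def Claim_equal_solution : Prop := ∀ (maps : List String), Dom_solution maps → Pre_solution maps → Spec_solution maps (solution maps)

-- ===== LEMMAS AND PROOFS =====

-- (y, x, l) paired with a time stamp, as stored in A's deque
def pvTimed (t : Int) (s : pvSt) : Int × Int × Int × Int := (s.1, s.2.1, s.2.2, t)

-- A's 3D visited array agrees with a visited list
def pvVisRel (v : Int → Int → Int → Bool) (w : List pvSt) : Prop :=
  ∀ y x l : Int, v y x l = decide ((y, x, l) ∈ w)

-- a valid move target and the step relation of both programs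
def pvOkP (maps : List String) (n m ny nx : Int) : Prop :=
  (0 ≤ ny ∧ ny < n ∧ 0 ≤ nx ∧ nx < m) ∧ pvCell maps ny nx ≠ 'X'

def pvTgt (maps : List String) (s : pvSt) (d : Int × Int) : pvSt :=
  (s.1 + d.1, s.2.1 + d.2,
    if pvCell maps (s.1 + d.1) (s.2.1 + d.2) = 'L' ∨ s.2.2 = 1 then 1 else 0)

def pvEdge (maps : List String) (n m : Int) (s w : pvSt) : Prop :=
  ∃ d ∈ pvDirs, pvOkP maps n m (s.1 + d.1) (s.2.1 + d.2) ∧ w = pvTgt maps s d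

-- ---- the intermediate layered BFS (proof-side reference implementation) ----

def pvStepB (maps : List String) (n m y x l : Int)
    (st : List pvSt × List pvSt) (d : Int × Int) : List pvSt × List pvSt :=
  if ((0 ≤ y + d.1 ∧ y + d.1 < n ∧ 0 ≤ x + d.2 ∧ x + d.2 < m) ∧ pvCell maps (y + d.1) (x + d.2) ≠ 'X') then
    if (y + d.1, x + d.2, (if pvCell maps (y + d.1) (x + d.2) = 'L' ∨ l = 1 then (1:Int) else 0)) ∈ st.2 then st
    else (st.1 ++ [(y + d.1, x + d.2, (if pvCell maps (y + d.1) (x + d.2) = 'L' ∨ l = 1 then (1:Int) else 0))],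
          PySem.Set.add st.2 (y + d.1, x + d.2, (if pvCell maps (y + d.1) (x + d.2) = 'L' ∨ l = 1 then (1:Int) else 0)))
  else st

def pvExpandB (maps : List String) (n m : Int) (frontier : List pvSt)
    (st : List pvSt × List pvSt) : List pvSt × List pvSt :=
  frontier.foldl (fun st s => pvDirs.foldl (pvStepB maps n m s.1 s.2.1 s.2.2) st) st

def pvRemB (n m : Int) (vis : List pvSt) : Nat :=
  ((pvAll n m).filter (fun s => !(decide (s ∈ vis)))).length

theorem pvRemB_add_lt (n m : Int) (vis : List pvSt) (s : pvSt)
    (hmem : s ∈ pvAll n m) (hs : s ∉ vis) :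
    pvRemB n m (PySem.Set.add vis s) < pvRemB n m vis := by
  rw [PySem.Set.add_of_not_mem hs]
  apply pvFilter_length_lt (pvAll n m)
      (fun z => !(decide (z ∈ vis))) (fun z => !(decide (z ∈ vis ++ [s])))
      ?_ s hmem (by simp [hs]) (by simp)
  intro z hz
  simp only [Bool.not_eq_true', decide_eq_false_iff_not, List.mem_append, List.mem_singleton] at hz ⊢
  tauto

theorem pvStepB_meas (maps : List String) (n m y x l : Int)
    (st : List pvSt × List pvSt) (d : Int × Int) :
    2 * pvRemB n m (pvStepB maps n m y x l st d).2 + (pvStepB maps n m y x l st d).1.length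
      ≤ 2 * pvRemB n m st.2 + st.1.length := by
  by_cases hok : ((0 ≤ y + d.1 ∧ y + d.1 < n ∧ 0 ≤ x + d.2 ∧ x + d.2 < m) ∧
      pvCell maps (y + d.1) (x + d.2) ≠ 'X')
  case neg => simp [pvStepB, hok]
  case pos =>
    by_cases hvis : (y + d.1, x + d.2,
        (if pvCell maps (y + d.1) (x + d.2) = 'L' ∨ l = 1 then (1:Int) else 0)) ∈ st.2
    case pos => simp [pvStepB, hok, hvis]
    case neg =>
      simp only [pvStepB, if_pos hok, if_neg hvis]
      have hmem : (y + d.1, x + d.2,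
          (if pvCell maps (y + d.1) (x + d.2) = 'L' ∨ l = 1 then (1:Int) else 0)) ∈ pvAll n m := by
        obtain ⟨⟨h1, h2, h3, h4⟩, -⟩ := hok
        simp only [pvAll, List.mem_flatMap, PySem.List.mem_pyRange_one]
        refine ⟨y + d.1, ⟨h1, h2⟩, x + d.2, ⟨h3, h4⟩, ?_⟩
        split <;> simp
      have hlt := pvRemB_add_lt n m st.2 _ hmem hvis
      simp only [List.length_append, List.length_cons, List.length_nil]
      omega

theorem pvExpandB_meas (maps : List String) (n m : Int) (frontier : List pvSt) :
    ∀ st : List pvSt × List pvSt,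
    2 * pvRemB n m (pvExpandB maps n m frontier st).2 + (pvExpandB maps n m frontier st).1.length
      ≤ 2 * pvRemB n m st.2 + st.1.length := by
  induction frontier with
  | nil => intro st; simp [pvExpandB]
  | cons s fr ih =>
    intro st
    have hdirs : ∀ (ds : List (Int × Int)) (st : List pvSt × List pvSt),
        2 * pvRemB n m (ds.foldl (pvStepB maps n m s.1 s.2.1 s.2.2) st).2
            + (ds.foldl (pvStepB maps n m s.1 s.2.1 s.2.2) st).1.length
          ≤ 2 * pvRemB n m st.2 + st.1.length := by
      intro ds
      induction ds with
      | nil => intro st; simp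
      | cons d ds ihd =>
        intro st
        calc _ ≤ 2 * pvRemB n m (pvStepB maps n m s.1 s.2.1 s.2.2 st d).2
                  + (pvStepB maps n m s.1 s.2.1 s.2.2 st d).1.length := ihd _
          _ ≤ _ := pvStepB_meas maps n m s.1 s.2.1 s.2.2 st d
    calc _ ≤ 2 * pvRemB n m (pvDirs.foldl (pvStepB maps n m s.1 s.2.1 s.2.2) st).2
              + (pvDirs.foldl (pvStepB maps n m s.1 s.2.1 s.2.2) st).1.length := ih _
      _ ≤ _ := hdirs pvDirs st

def pvBfsB (maps : List String) (n m ey ex : Int)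
    (frontier vis : List pvSt) (t : Int) : Int :=
  if frontier = [] then -1
  else if (ey, ex, (1 : Int)) ∈ frontier then t
  else
    pvBfsB maps n m ey ex
      (pvExpandB maps n m frontier ([], vis)).1
      (pvExpandB maps n m frontier ([], vis)).2 (t + 1)
termination_by 2 * pvRemB n m vis + frontier.length
decreasing_by
  have h := pvExpandB_meas maps n m frontier ([], vis)
  have hlen : 1 ≤ frontier.length := by
    cases frontier with
    | nil => simp at *
    | cons a b => simp
  simp only [List.length_nil] at h
  omega

-- ---- A's deque BFS = layered BFS (bisimulation) ----

def pvNews (maps : List String) (n m : Int) (vis : List pvSt) (y x l : Int) :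
    List (Int × Int) → List pvSt
  | [] => []
  | d :: ds =>
    if ((0 ≤ y + d.1 ∧ y + d.1 < n ∧ 0 ≤ x + d.2 ∧ x + d.2 < m) ∧
          pvCell maps (y + d.1) (x + d.2) ≠ 'X') ∧
        (y + d.1, x + d.2, (if pvCell maps (y + d.1) (x + d.2) = 'L' ∨ l = 1 then (1:Int) else 0)) ∉ vis then
      (y + d.1, x + d.2, (if pvCell maps (y + d.1) (x + d.2) = 'L' ∨ l = 1 then (1:Int) else 0)) ::
        pvNews maps n m
          (vis ++ [(y + d.1, x + d.2, (if pvCell maps (y + d.1) (x + d.2) = 'L' ∨ l = 1 then (1:Int) else 0))])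
          y x l ds
    else pvNews maps n m vis y x l ds

theorem pvFoldB_eq (maps : List String) (n m y x l : Int) (ds : List (Int × Int)) :
    ∀ (vis acc : List pvSt),
    ds.foldl (pvStepB maps n m y x l) (acc, vis)
      = (acc ++ pvNews maps n m vis y x l ds, vis ++ pvNews maps n m vis y x l ds) := by
  induction ds with
  | nil => intro vis acc; simp [pvNews]
  | cons d ds ih =>
    intro vis acc
    by_cases hok : ((0 ≤ y + d.1 ∧ y + d.1 < n ∧ 0 ≤ x + d.2 ∧ x + d.2 < m) ∧
        pvCell maps (y + d.1) (x + d.2) ≠ 'X')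
    · by_cases hmem : (y + d.1, x + d.2,
          (if pvCell maps (y + d.1) (x + d.2) = 'L' ∨ l = 1 then (1:Int) else 0)) ∈ vis
      · have hstep : pvStepB maps n m y x l (acc, vis) d = (acc, vis) := by
          simp [pvStepB, hok, hmem]
        have hcond : ¬(((0 ≤ y + d.1 ∧ y + d.1 < n ∧ 0 ≤ x + d.2 ∧ x + d.2 < m) ∧
            pvCell maps (y + d.1) (x + d.2) ≠ 'X') ∧
            (y + d.1, x + d.2,
              (if pvCell maps (y + d.1) (x + d.2) = 'L' ∨ l = 1 then (1:Int) else 0)) ∉ vis) := by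
          tauto
        rw [List.foldl_cons, hstep, ih, pvNews, if_neg hcond]
      · have hstep : pvStepB maps n m y x l (acc, vis) d
            = (acc ++ [(y + d.1, x + d.2,
                (if pvCell maps (y + d.1) (x + d.2) = 'L' ∨ l = 1 then (1:Int) else 0))],
               vis ++ [(y + d.1, x + d.2,
                (if pvCell maps (y + d.1) (x + d.2) = 'L' ∨ l = 1 then (1:Int) else 0))]) := by
          simp [pvStepB, hok, hmem, PySem.Set.add_of_not_mem hmem]
        have hcond : (((0 ≤ y + d.1 ∧ y + d.1 < n ∧ 0 ≤ x + d.2 ∧ x + d.2 < m) ∧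
            pvCell maps (y + d.1) (x + d.2) ≠ 'X') ∧
            (y + d.1, x + d.2,
              (if pvCell maps (y + d.1) (x + d.2) = 'L' ∨ l = 1 then (1:Int) else 0)) ∉ vis) :=
          ⟨hok, hmem⟩
        rw [List.foldl_cons, hstep, ih, pvNews, if_pos hcond]
        simp
    · have hstep : pvStepB maps n m y x l (acc, vis) d = (acc, vis) := by
        simp [pvStepB, hok]
      have hcond : ¬(((0 ≤ y + d.1 ∧ y + d.1 < n ∧ 0 ≤ x + d.2 ∧ x + d.2 < m) ∧
          pvCell maps (y + d.1) (x + d.2) ≠ 'X') ∧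
          (y + d.1, x + d.2,
            (if pvCell maps (y + d.1) (x + d.2) = 'L' ∨ l = 1 then (1:Int) else 0)) ∉ vis) := by
        tauto
      rw [List.foldl_cons, hstep, ih, pvNews, if_neg hcond]

theorem pvVisRel_mark (v : Int → Int → Int → Bool) (w : List pvSt) (a b c : Int)
    (h : pvVisRel v w) : pvVisRel (pvMark v a b c) (w ++ [(a, b, c)]) := by
  intro y x l
  by_cases he : y = a ∧ x = b ∧ l = c
  · obtain ⟨e1, e2, e3⟩ := he; subst e1; subst e2; subst e3
    simp [pvMark]
  · have : ((y, x, l) ∈ w ++ [(a, b, c)]) ↔ (y, x, l) ∈ w := by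
      simp only [List.mem_append, List.mem_singleton, Prod.mk.injEq]
      tauto
    simp [pvMark, he, h y x l, this]

theorem pvFoldA_eq (maps : List String) (n m y x l t : Int) (ds : List (Int × Int)) :
    ∀ (visA : Int → Int → Int → Bool) (visB : List pvSt) (q : List (Int × Int × Int × Int)),
    pvVisRel visA visB →
    (ds.foldl (pvStepA maps n m y x l t) (q, visA)).1
        = q ++ (pvNews maps n m visB y x l ds).map (pvTimed (t + 1))
      ∧ pvVisRel (ds.foldl (pvStepA maps n m y x l t) (q, visA)).2
          (visB ++ pvNews maps n m visB y x l ds) := by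
  induction ds with
  | nil => intro visA visB q h; simp [pvNews, h]
  | cons d ds ih =>
    intro visA visB q h
    have hva := h (y + d.1) (x + d.2)
        (if pvCell maps (y + d.1) (x + d.2) = 'L' ∨ l = 1 then (1:Int) else 0)
    by_cases hok : ((0 ≤ y + d.1 ∧ y + d.1 < n ∧ 0 ≤ x + d.2 ∧ x + d.2 < m) ∧
        pvCell maps (y + d.1) (x + d.2) ≠ 'X')
    · by_cases hmem : (y + d.1, x + d.2,
          (if pvCell maps (y + d.1) (x + d.2) = 'L' ∨ l = 1 then (1:Int) else 0)) ∈ visB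
      · have hstep : pvStepA maps n m y x l t (q, visA) d = (q, visA) := by
          simp [pvStepA, hok, hva, hmem]
        have hcond : ¬(((0 ≤ y + d.1 ∧ y + d.1 < n ∧ 0 ≤ x + d.2 ∧ x + d.2 < m) ∧
            pvCell maps (y + d.1) (x + d.2) ≠ 'X') ∧
            (y + d.1, x + d.2,
              (if pvCell maps (y + d.1) (x + d.2) = 'L' ∨ l = 1 then (1:Int) else 0)) ∉ visB) := by
          tauto
        rw [List.foldl_cons, hstep, pvNews, if_neg hcond]
        exact ih visA visB q h
      · have hstep : pvStepA maps n m y x l t (q, visA) d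
            = (q ++ [pvTimed (t + 1) (y + d.1, x + d.2,
                (if pvCell maps (y + d.1) (x + d.2) = 'L' ∨ l = 1 then (1:Int) else 0))],
               pvMark visA (y + d.1) (x + d.2)
                (if pvCell maps (y + d.1) (x + d.2) = 'L' ∨ l = 1 then (1:Int) else 0)) := by
          simp [pvStepA, hok, hva, hmem, pvTimed]
        have hcond : (((0 ≤ y + d.1 ∧ y + d.1 < n ∧ 0 ≤ x + d.2 ∧ x + d.2 < m) ∧
            pvCell maps (y + d.1) (x + d.2) ≠ 'X') ∧
            (y + d.1, x + d.2,
              (if pvCell maps (y + d.1) (x + d.2) = 'L' ∨ l = 1 then (1:Int) else 0)) ∉ visB) :=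
          ⟨hok, hmem⟩
        rw [List.foldl_cons, hstep, pvNews, if_pos hcond]
        have hrel' := pvVisRel_mark visA visB (y + d.1) (x + d.2)
            (if pvCell maps (y + d.1) (x + d.2) = 'L' ∨ l = 1 then (1:Int) else 0) h
        obtain ⟨h1, h2⟩ := ih
            (pvMark visA (y + d.1) (x + d.2)
              (if pvCell maps (y + d.1) (x + d.2) = 'L' ∨ l = 1 then (1:Int) else 0))
            (visB ++ [(y + d.1, x + d.2,
              (if pvCell maps (y + d.1) (x + d.2) = 'L' ∨ l = 1 then (1:Int) else 0))])
            (q ++ [pvTimed (t + 1) (y + d.1, x + d.2,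
              (if pvCell maps (y + d.1) (x + d.2) = 'L' ∨ l = 1 then (1:Int) else 0))])
            hrel'
        refine ⟨?_, ?_⟩
        · rw [h1]; simp
        · simpa [List.append_assoc] using h2
    · have hstep : pvStepA maps n m y x l t (q, visA) d = (q, visA) := by
        simp [pvStepA, hok]
      have hcond : ¬(((0 ≤ y + d.1 ∧ y + d.1 < n ∧ 0 ≤ x + d.2 ∧ x + d.2 < m) ∧
          pvCell maps (y + d.1) (x + d.2) ≠ 'X') ∧
          (y + d.1, x + d.2,
            (if pvCell maps (y + d.1) (x + d.2) = 'L' ∨ l = 1 then (1:Int) else 0)) ∉ visB) := by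
        tauto
      rw [List.foldl_cons, hstep, pvNews, if_neg hcond]
      exact ih visA visB q h

theorem pvLayerA (maps : List String) (n m ey ex : Int) :
    ∀ (pending accS : List pvSt) (visA : Int → Int → Int → Bool) (visB : List pvSt) (t : Int),
    pvVisRel visA visB →
    (((ey, ex, (1:Int)) ∈ pending →
        pvBfsA maps n m ey ex (pending.map (pvTimed t) ++ accS.map (pvTimed (t + 1))) visA = t)
     ∧ ((ey, ex, (1:Int)) ∉ pending →
        ∃ visA', pvVisRel visA' (pvExpandB maps n m pending (accS, visB)).2 ∧
          pvBfsA maps n m ey ex (pending.map (pvTimed t) ++ accS.map (pvTimed (t + 1))) visA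
            = pvBfsA maps n m ey ex
                ((pvExpandB maps n m pending (accS, visB)).1.map (pvTimed (t + 1))) visA')) := by
  intro pending
  induction pending with
  | nil =>
    intro accS visA visB t h
    refine ⟨fun hg => absurd hg (by simp), fun _ => ⟨visA, ?_, ?_⟩⟩
    · simpa [pvExpandB] using h
    · simp [pvExpandB]
  | cons s tl ih =>
    intro accS visA visB t h
    obtain ⟨a, b, c⟩ := s
    have hunf : pvBfsA maps n m ey ex
        (((a, b, c) :: tl).map (pvTimed t) ++ accS.map (pvTimed (t + 1))) visA
        = if a = ey ∧ b = ex ∧ c = 1 then t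
          else pvBfsA maps n m ey ex
            (pvDirs.foldl (pvStepA maps n m a b c t)
              (tl.map (pvTimed t) ++ accS.map (pvTimed (t + 1)), visA)).1
            (pvDirs.foldl (pvStepA maps n m a b c t)
              (tl.map (pvTimed t) ++ accS.map (pvTimed (t + 1)), visA)).2 := by
      rw [List.map_cons, List.cons_append, pvTimed, pvBfsA]
    by_cases hg : a = ey ∧ b = ex ∧ c = 1
    · constructor
      · intro _
        rw [hunf, if_pos hg]
      · intro hng
        exact absurd (by simp [hg.1, hg.2.1, hg.2.2] : (ey, ex, (1:Int)) ∈ (a, b, c) :: tl) hng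
    · obtain ⟨h1, h2⟩ := pvFoldA_eq maps n m a b c t pvDirs visA visB
        (tl.map (pvTimed t) ++ accS.map (pvTimed (t + 1))) h
      have hq1 : (pvDirs.foldl (pvStepA maps n m a b c t)
            (tl.map (pvTimed t) ++ accS.map (pvTimed (t + 1)), visA)).1
          = tl.map (pvTimed t)
            ++ (accS ++ pvNews maps n m visB a b c pvDirs).map (pvTimed (t + 1)) := by
        rw [h1]; simp [List.append_assoc]
      have hexp : pvExpandB maps n m ((a, b, c) :: tl) (accS, visB)
          = pvExpandB maps n m tl
              (accS ++ pvNews maps n m visB a b c pvDirs,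
               visB ++ pvNews maps n m visB a b c pvDirs) := by
        unfold pvExpandB
        rw [List.foldl_cons, pvFoldB_eq maps n m a b c pvDirs visB accS]
      obtain ⟨ih1, ih2⟩ := ih (accS ++ pvNews maps n m visB a b c pvDirs)
        (pvDirs.foldl (pvStepA maps n m a b c t)
          (tl.map (pvTimed t) ++ accS.map (pvTimed (t + 1)), visA)).2
        (visB ++ pvNews maps n m visB a b c pvDirs) t h2
      have hgoal : ¬((a : Int), b, c) = (ey, ex, (1:Int)) := by
        simp only [Prod.mk.injEq]; tauto
      constructor
      · intro hmem
        have hmem' : (ey, ex, (1:Int)) ∈ tl := by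
          rcases List.mem_cons.mp hmem with hh | hh
          · exact absurd hh.symm hgoal
          · exact hh
        rw [hunf, if_neg hg, hq1]
        exact ih1 hmem'
      · intro hnm
        have hnm' : (ey, ex, (1:Int)) ∉ tl := fun hh => hnm (List.mem_cons_of_mem _ hh)
        obtain ⟨visA', hrel', heq⟩ := ih2 hnm'
        refine ⟨visA', by rw [hexp]; exact hrel', ?_⟩
        rw [hunf, if_neg hg, hq1, hexp]
        exact heq

theorem pvBfsAB (maps : List String) (n m ey ex : Int) :
    ∀ (frontier visB : List pvSt) (t : Int) (visA : Int → Int → Int → Bool),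
    pvVisRel visA visB →
    pvBfsA maps n m ey ex (frontier.map (pvTimed t)) visA = pvBfsB maps n m ey ex frontier visB t := by
  intro frontier visB t
  induction frontier, visB, t using pvBfsB.induct maps n m ey ex with
  | case1 vis t =>
    intro visA h
    simp only [List.map_nil]
    rw [pvBfsA, pvBfsB]
    simp
  | case2 frontier vis t hne hmem =>
    intro visA h
    have hl := (pvLayerA maps n m ey ex frontier [] visA vis t h).1 hmem
    simp only [List.map_nil, List.append_nil] at hl
    rw [pvBfsB, if_neg hne, if_pos hmem]
    exact hl
  | case3 frontier vis t hne hnm ih =>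
    intro visA h
    obtain ⟨visA', hrel', heq⟩ := (pvLayerA maps n m ey ex frontier [] visA vis t h).2 hnm
    simp only [List.map_nil, List.append_nil] at heq
    rw [pvBfsB, if_neg hne, if_neg hnm]
    exact heq.trans (ih visA' hrel')

-- ---- the scan of A agrees with the comprehensions of B ----

theorem pvFilterMap_if {α β : Type} (l : List α) (p : α → Prop) [DecidablePred p] (f : α → β) :
    l.filterMap (fun a => if p a then some (f a) else none)
      = (l.filter (fun a => decide (p a))).map f := by
  induction l with
  | nil => rfl
  | cons a t ih => by_cases h : p a <;> simp [h, ih]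

theorem pvFoldLast (l : List (Int × Int)) (pS pE : (Int × Int) → Prop)
    [DecidablePred pS] [DecidablePred pE] (hdisj : ∀ z, pS z → ¬ pE z) :
    ∀ (s0 e0 : Int × Int),
    l.foldl (fun st ij => if pS ij then (ij, st.2) else if pE ij then (st.1, ij) else st) (s0, e0)
      = ((l.filter (fun ij => decide (pS ij))).getLastD s0,
         (l.filter (fun ij => decide (pE ij))).getLastD e0) := by
  induction l with
  | nil => intro s0 e0; rfl
  | cons a t ih =>
    intro s0 e0
    by_cases hS : pS a
    · have hE : ¬ pE a := hdisj a hS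
      rw [List.foldl_cons, if_pos hS, ih a e0]
      simp only [List.filter_cons, decide_eq_true hS, decide_eq_false hE,
        Bool.false_eq_true, if_false]
      exact congrArg₂ Prod.mk (by rw [if_pos trivial, List.getLastD_cons]) rfl
    · by_cases hE : pE a
      · rw [List.foldl_cons, if_neg hS, if_pos hE, ih s0 a]
        simp only [List.filter_cons, decide_eq_true hE, decide_eq_false hS,
          Bool.false_eq_true, if_false]
        exact congrArg₂ Prod.mk rfl (by rw [if_pos trivial, List.getLastD_cons])
      · rw [List.foldl_cons, if_neg hS, if_neg hE, ih s0 e0]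
        simp only [List.filter_cons, decide_eq_false hS, decide_eq_false hE,
          Bool.false_eq_true, if_false]

-- the flattened scan order of the grid
def pvFlat (n m : Int) : List (Int × Int) :=
  (PySem.List.pyRange 0 n 1).flatMap (fun i =>
    (PySem.List.pyRange 0 m 1).map (fun j => (i, j)))

theorem pvFindAll_eq_filter (maps : List String) (n m : Int) (c : Char) :
    pvFindAll maps n m c = (pvFlat n m).filter (fun ij => decide (pvCell maps ij.1 ij.2 = c)) := by
  unfold pvFindAll pvFlat
  rw [List.filter_flatMap]
  congr 1
  funext i
  rw [pvFilterMap_if _ (fun j => pvCell maps i j = c) (fun j => (i, j)), List.filter_map]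
  rfl

theorem pvScanA_eq (maps : List String) (n m : Int) :
    pvScanA maps n m
      = ((pvFindAll maps n m 'S').getLastD (-1, -1), (pvFindAll maps n m 'E').getLastD (-1, -1)) := by
  have hflat : pvScanA maps n m
      = (pvFlat n m).foldl (fun st ij =>
          if pvCell maps ij.1 ij.2 = 'S' then (ij, st.2)
          else if pvCell maps ij.1 ij.2 = 'E' then (st.1, ij) else st) ((-1, -1), (-1, -1)) := by
    unfold pvScanA pvFlat
    rw [List.foldl_flatMap]
    congr 1
    funext st i
    rw [List.foldl_map]
  rw [hflat, pvFoldLast _ (fun ij => pvCell maps ij.1 ij.2 = 'S')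
      (fun ij => pvCell maps ij.1 ij.2 = 'E') (by intro z h1 h2; rw [h1] at h2; cases h2),
      pvFindAll_eq_filter, pvFindAll_eq_filter]

theorem pvFindAll_nonneg (maps : List String) (n m : Int) (c : Char) :
    ∀ p ∈ pvFindAll maps n m c, 0 ≤ p.1 ∧ 0 ≤ p.2 := by
  intro p hp
  rw [pvFindAll_eq_filter] at hp
  have hp' := List.mem_of_mem_filter hp
  unfold pvFlat at hp'
  rw [List.mem_flatMap] at hp'
  obtain ⟨i, hi, hpi⟩ := hp'
  rw [List.mem_map] at hpi
  obtain ⟨j, hj, rfl⟩ := hpi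
  rw [PySem.List.mem_pyRange_one] at hi hj
  exact ⟨hi.1, hj.1⟩

theorem pvGetLastD_mem {α : Type} (l : List α) (d : α) (h : l ≠ []) : l.getLastD d ∈ l := by
  rw [List.getLastD_eq_getLast?, List.getLast?_eq_some_getLast h]
  exact List.getLast_mem h

-- ---- layered BFS = sweep loop (the new bridging) ----

-- the batch of fresh states one whole layer expansion produces
def pvDelta (maps : List String) (n m : Int) : List pvSt → List pvSt → List pvSt
  | [], _ => []
  | s :: F, vis =>
    pvNews maps n m vis s.1 s.2.1 s.2.2 pvDirs
      ++ pvDelta maps n m F (vis ++ pvNews maps n m vis s.1 s.2.1 s.2.2 pvDirs)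

theorem pvExpandB_delta (maps : List String) (n m : Int) :
    ∀ (F : List pvSt) (acc vis : List pvSt),
    pvExpandB maps n m F (acc, vis)
      = (acc ++ pvDelta maps n m F vis, vis ++ pvDelta maps n m F vis) := by
  intro F
  induction F with
  | nil => intro acc vis; simp [pvExpandB, pvDelta]
  | cons s F ih =>
    intro acc vis
    have h1 : pvExpandB maps n m (s :: F) (acc, vis)
        = pvExpandB maps n m F (acc ++ pvNews maps n m vis s.1 s.2.1 s.2.2 pvDirs,
            vis ++ pvNews maps n m vis s.1 s.2.1 s.2.2 pvDirs) := by
      unfold pvExpandB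
      rw [List.foldl_cons, pvFoldB_eq]
    rw [h1, ih, pvDelta]
    simp [List.append_assoc]

theorem pvNews_mem_nodup (maps : List String) (n m y x l : Int) :
    ∀ (ds : List (Int × Int)) (vis : List pvSt),
    (∀ w, w ∈ vis ++ pvNews maps n m vis y x l ds
        ↔ w ∈ vis ∨ ∃ d ∈ ds, pvOkP maps n m (y + d.1) (x + d.2) ∧ w = pvTgt maps (y, x, l) d)
    ∧ (vis.Nodup → (vis ++ pvNews maps n m vis y x l ds).Nodup) := by
  intro ds
  induction ds with
  | nil => intro vis; simp [pvNews]
  | cons d ds ih =>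
    intro vis
    set w0 : pvSt := (y + d.1, x + d.2,
      (if pvCell maps (y + d.1) (x + d.2) = 'L' ∨ l = 1 then (1:Int) else 0)) with hw0
    have htgt : pvTgt maps (y, x, l) d = w0 := by simp [pvTgt, hw0]
    by_cases hok : ((0 ≤ y + d.1 ∧ y + d.1 < n ∧ 0 ≤ x + d.2 ∧ x + d.2 < m) ∧
        pvCell maps (y + d.1) (x + d.2) ≠ 'X')
    · have hokP : pvOkP maps n m (y + d.1) (x + d.2) := hok
      by_cases hmem : w0 ∈ vis
      · have : pvNews maps n m vis y x l (d :: ds) = pvNews maps n m vis y x l ds := by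
          rw [pvNews, if_neg (by rw [← hw0]; tauto)]
        rw [this]
        obtain ⟨ihm, ihn⟩ := ih vis
        refine ⟨fun w => ?_, ihn⟩
        rw [ihm w]
        constructor
        · rintro (h | ⟨dd, hdd, hok', rfl⟩)
          · exact Or.inl h
          · exact Or.inr ⟨dd, List.mem_cons_of_mem _ hdd, hok', rfl⟩
        · rintro (h | ⟨dd, hdd, hok', rfl⟩)
          · exact Or.inl h
          · rcases List.mem_cons.mp hdd with rfl | hdd'
            · exact Or.inl (htgt ▸ hmem)
            · exact Or.inr ⟨dd, hdd', hok', rfl⟩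
      · have hnews : pvNews maps n m vis y x l (d :: ds)
            = w0 :: pvNews maps n m (vis ++ [w0]) y x l ds := by
          rw [pvNews, if_pos (by rw [← hw0]; exact ⟨hok, hmem⟩)]
        rw [hnews]
        obtain ⟨ihm, ihn⟩ := ih (vis ++ [w0])
        have hshape : vis ++ w0 :: pvNews maps n m (vis ++ [w0]) y x l ds
            = (vis ++ [w0]) ++ pvNews maps n m (vis ++ [w0]) y x l ds := by simp
        constructor
        · intro w
          rw [hshape, ihm w]
          constructor
          · rintro (h | ⟨dd, hdd, hok', rfl⟩)
            · rcases List.mem_append.mp h with h | h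
              · exact Or.inl h
              · rcases List.mem_singleton.mp h with rfl
                exact Or.inr ⟨d, List.mem_cons_self .., hokP, htgt.symm⟩
            · exact Or.inr ⟨dd, List.mem_cons_of_mem _ hdd, hok', rfl⟩
          · rintro (h | ⟨dd, hdd, hok', rfl⟩)
            · exact Or.inl (List.mem_append.mpr (Or.inl h))
            · rcases List.mem_cons.mp hdd with rfl | hdd'
              · exact Or.inl (by rw [htgt]; simp)
              · exact Or.inr ⟨dd, hdd', hok', rfl⟩
        · intro hnd
          rw [hshape]
          refine ihn (List.nodup_append.mpr ⟨hnd, List.nodup_singleton _, ?_⟩)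
          intro z hz z2 hz2
          rw [List.mem_singleton] at hz2
          subst hz2
          exact fun he => hmem (he ▸ hz)
    · have : pvNews maps n m vis y x l (d :: ds) = pvNews maps n m vis y x l ds := by
        rw [pvNews, if_neg (by rw [← hw0]; tauto)]
      rw [this]
      obtain ⟨ihm, ihn⟩ := ih vis
      refine ⟨fun w => ?_, ihn⟩
      rw [ihm w]
      constructor
      · rintro (h | ⟨dd, hdd, hok', rfl⟩)
        · exact Or.inl h
        · exact Or.inr ⟨dd, List.mem_cons_of_mem _ hdd, hok', rfl⟩
      · rintro (h | ⟨dd, hdd, hok', rfl⟩)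
        · exact Or.inl h
        · rcases List.mem_cons.mp hdd with rfl | hdd'
          · exact absurd hok' hok
          · exact Or.inr ⟨dd, hdd', hok', rfl⟩

theorem pvDelta_mem_nodup (maps : List String) (n m : Int) :
    ∀ (F vis : List pvSt),
    (∀ w, w ∈ vis ++ pvDelta maps n m F vis
        ↔ w ∈ vis ∨ ∃ s ∈ F, pvEdge maps n m s w)
    ∧ (vis.Nodup → (vis ++ pvDelta maps n m F vis).Nodup) := by
  intro F
  induction F with
  | nil => intro vis; simp [pvDelta]
  | cons s F ih =>
    intro vis
    obtain ⟨hm1, hn1⟩ := pvNews_mem_nodup maps n m s.1 s.2.1 s.2.2 pvDirs vis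
    obtain ⟨hm2, hn2⟩ := ih (vis ++ pvNews maps n m vis s.1 s.2.1 s.2.2 pvDirs)
    have hshape : vis ++ pvDelta maps n m (s :: F) vis
        = (vis ++ pvNews maps n m vis s.1 s.2.1 s.2.2 pvDirs)
          ++ pvDelta maps n m F (vis ++ pvNews maps n m vis s.1 s.2.1 s.2.2 pvDirs) := by
      rw [pvDelta]; simp
    constructor
    · intro w
      rw [hshape, hm2 w, hm1 w]
      have hedge : (∃ d ∈ pvDirs, pvOkP maps n m (s.1 + d.1) (s.2.1 + d.2)
            ∧ w = pvTgt maps (s.1, s.2.1, s.2.2) d) ↔ pvEdge maps n m s w := by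
        unfold pvEdge; simp
      rw [hedge]
      constructor
      · rintro ((h | h) | ⟨z, hz, he⟩)
        · exact Or.inl h
        · exact Or.inr ⟨s, List.mem_cons_self .., h⟩
        · exact Or.inr ⟨z, List.mem_cons_of_mem _ hz, he⟩
      · rintro (h | ⟨z, hz, he⟩)
        · exact Or.inl (Or.inl h)
        · rcases List.mem_cons.mp hz with rfl | hz'
          · exact Or.inl (Or.inr he)
          · exact Or.inr ⟨z, hz', he⟩
    · intro hnd
      rw [hshape]
      exact hn2 (hn1 hnd)

-- the loop invariant tying the layered BFS state to the distance dictionary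
def pvInv (maps : List String) (n m : Int) (F V : List pvSt) (t : Int)
    (dist : PySem.Dict pvSt Int) : Prop :=
  (∀ s : pvSt, dist.contains s = true ↔ s ∈ V) ∧
  (∀ s ∈ V, ∃ k : Int, dist.get? s = some k ∧ k ≤ t ∧ (s ∈ F ↔ k = t)) ∧
  (∀ s ∈ V, s ∉ F → ∀ w, pvEdge maps n m s w → w ∈ V) ∧
  (∀ s ∈ V, ∀ w ∈ V, pvEdge maps n m s w →
    ∀ a b : Int, dist.get? s = some a → dist.get? w = some b → b ≤ a + 1) ∧
  dist.keys.Nodup ∧ V.Nodup ∧ (∀ s ∈ F, s ∈ V)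

-- characterisation of one dirs-fold of pvStepR from a known state s ∈ V
theorem pvStepRFold (maps : List String) (n m : Int) (F V : List pvSt) (t : Int)
    (dist : PySem.Dict pvSt Int) (hInv : pvInv maps n m F V t dist)
    (s : pvSt) (hsV : s ∈ V) (dv : Int) (hdv : dist.get? s = some dv) :
    ∀ (ds : List (Int × Int)), (∀ d ∈ ds, d ∈ pvDirs) →
    ∀ (acc : PySem.Dict pvSt Int),
    (∀ k ∈ V, acc.get? k = dist.get? k) →
    (∀ k : pvSt, k ∉ V → acc.get? k = none ∨ acc.get? k = some (t + 1)) →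
    acc.keys.Nodup →
    (∀ k ∈ V, (ds.foldl (pvStepR maps n m s.1 s.2.1 s.2.2 dv) acc).get? k = dist.get? k) ∧
    (∀ k : pvSt, k ∉ V →
      ((ds.foldl (pvStepR maps n m s.1 s.2.1 s.2.2 dv) acc).get? k = none
        ∨ (ds.foldl (pvStepR maps n m s.1 s.2.1 s.2.2 dv) acc).get? k = some (t + 1))
      ∧ (((ds.foldl (pvStepR maps n m s.1 s.2.1 s.2.2 dv) acc).get? k).isSome
          ↔ (acc.get? k).isSome
            ∨ ∃ d ∈ ds, pvOkP maps n m (s.1 + d.1) (s.2.1 + d.2) ∧ k = pvTgt maps s d)) ∧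
    (ds.foldl (pvStepR maps n m s.1 s.2.1 s.2.2 dv) acc).keys.Nodup := by
  obtain ⟨k1, k3, k4, k5, kn, kv, kf⟩ := hInv
  intro ds
  induction ds with
  | nil =>
    intro _ acc ha1 ha2 ha3
    refine ⟨ha1, ?_, ha3⟩
    intro k hk
    exact ⟨ha2 k hk, by simp⟩
  | cons d ds ih =>
    intro hds acc ha1 ha2 ha3
    rw [List.foldl_cons]
    have hdd : d ∈ pvDirs := hds d (List.mem_cons_self ..)
    have hds' : ∀ d' ∈ ds, d' ∈ pvDirs := fun d' h => hds d' (List.mem_cons_of_mem _ h)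
    by_cases hok : ((0 ≤ s.1 + d.1 ∧ s.1 + d.1 < n ∧ 0 ≤ s.2.1 + d.2 ∧ s.2.1 + d.2 < m)
        ∧ pvCell maps (s.1 + d.1) (s.2.1 + d.2) ≠ 'X')
    case neg =>
      have hocf : ¬ pvOkP maps n m (s.1 + d.1) (s.2.1 + d.2) := hok
      have hstep : pvStepR maps n m s.1 s.2.1 s.2.2 dv acc d = acc := by
        unfold pvStepR; rw [if_neg hok]
      rw [hstep]
      obtain ⟨c1, c2, c3⟩ := ih hds' acc ha1 ha2 ha3
      refine ⟨c1, ?_, c3⟩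
      intro k hk
      obtain ⟨cn, ciff⟩ := c2 k hk
      refine ⟨cn, ciff.trans ?_⟩
      constructor
      · rintro (h | ⟨d', hd', hp⟩)
        · exact Or.inl h
        · exact Or.inr ⟨d', List.mem_cons_of_mem _ hd', hp⟩
      · rintro (h | ⟨d', hd', hp⟩)
        · exact Or.inl h
        · rcases List.mem_cons.mp hd' with rfl | hd''
          · exact absurd hp.1 hocf
          · exact Or.inr ⟨d', hd'', hp⟩
    case pos =>
      have hokP : pvOkP maps n m (s.1 + d.1) (s.2.1 + d.2) := hok
      have hwt : pvTgt maps s d = (s.1 + d.1, s.2.1 + d.2,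
          (if pvCell maps (s.1 + d.1) (s.2.1 + d.2) = 'L' ∨ s.2.2 = 1 then (1:Int) else 0)) := rfl
      have hedge : pvEdge maps n m s (pvTgt maps s d) := ⟨d, hdd, hokP, rfl⟩
      by_cases hwV : pvTgt maps s d ∈ V
      · -- known target: the relaxation guard never fires (triangle property)
        obtain ⟨b, hb, hbt, hbiff⟩ := k3 _ hwV
        have haccw : acc.get? (s.1 + d.1, s.2.1 + d.2,
            (if pvCell maps (s.1 + d.1) (s.2.1 + d.2) = 'L' ∨ s.2.2 = 1 then (1:Int) else 0))
            = some b := by rw [← hwt, ha1 _ hwV, hb]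
        have hble : b ≤ dv + 1 := k5 s hsV _ hwV hedge dv b hdv hb
        have hstep : pvStepR maps n m s.1 s.2.1 s.2.2 dv acc d = acc := by
          unfold pvStepR
          rw [if_pos hok, haccw]
          dsimp only
          rw [if_neg (by omega : ¬ b > dv + 1)]
        rw [hstep]
        obtain ⟨c1, c2, c3⟩ := ih hds' acc ha1 ha2 ha3
        refine ⟨c1, ?_, c3⟩
        intro k hk
        obtain ⟨cn, ciff⟩ := c2 k hk
        refine ⟨cn, ciff.trans ?_⟩
        constructor
        · rintro (h | ⟨d', hd', hp⟩)
          · exact Or.inl h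
          · exact Or.inr ⟨d', List.mem_cons_of_mem _ hd', hp⟩
        · rintro (h | ⟨d', hd', hp⟩)
          · exact Or.inl h
          · rcases List.mem_cons.mp hd' with rfl | hd''
            · exact absurd (hp.2 ▸ hwV) hk
            · exact Or.inr ⟨d', hd'', hp⟩
      · -- fresh target: only frontier states reach it, with value exactly t + 1
        have hsF : s ∈ F := by
          by_contra hsF
          exact hwV (k4 s hsV hsF _ hedge)
        have hdvt : dv = t := by
          obtain ⟨a, ha, -, haiff⟩ := k3 s hsV
          rw [hdv] at ha
          rw [Option.some.inj ha]
          exact haiff.mp hsF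
        cases hag : acc.get? (s.1 + d.1, s.2.1 + d.2,
            (if pvCell maps (s.1 + d.1) (s.2.1 + d.2) = 'L' ∨ s.2.2 = 1 then (1:Int) else 0)) with
        | some c =>
          have hagw : acc.get? (pvTgt maps s d) = some c := by rw [hwt]; exact hag
          have hc : c = t + 1 := by
            rcases ha2 _ hwV with h | h
            · rw [hagw] at h; cases h
            · rw [hagw] at h; exact Option.some.inj h
          have hstep : pvStepR maps n m s.1 s.2.1 s.2.2 dv acc d = acc := by
            unfold pvStepR
            rw [if_pos hok, hag]
            dsimp only
            rw [if_neg (by omega : ¬ c > dv + 1)]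
          rw [hstep]
          obtain ⟨c1, c2, c3⟩ := ih hds' acc ha1 ha2 ha3
          refine ⟨c1, ?_, c3⟩
          intro k hk
          obtain ⟨cn, ciff⟩ := c2 k hk
          refine ⟨cn, ciff.trans ?_⟩
          constructor
          · rintro (h | ⟨d', hd', hp⟩)
            · exact Or.inl h
            · exact Or.inr ⟨d', List.mem_cons_of_mem _ hd', hp⟩
          · rintro (h | ⟨d', hd', hp⟩)
            · exact Or.inl h
            · rcases List.mem_cons.mp hd' with rfl | hd''
              · exact Or.inl (by rw [hp.2, hagw]; rfl)
              · exact Or.inr ⟨d', hd'', hp⟩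
        | none =>
          have hagw : acc.get? (pvTgt maps s d) = none := by rw [hwt]; exact hag
          have hstep : pvStepR maps n m s.1 s.2.1 s.2.2 dv acc d
              = acc.insert (pvTgt maps s d) (dv + 1) := by
            unfold pvStepR
            rw [if_pos hok, hag]
            rfl
          rw [hstep]
          have ha1' : ∀ k ∈ V, (acc.insert (pvTgt maps s d) (dv + 1)).get? k = dist.get? k := by
            intro k hkV
            rw [PySem.Dict.get?_insert, if_neg (fun he => hwV (by rw [← he]; exact hkV))]
            exact ha1 k hkV
          have ha2' : ∀ k : pvSt, k ∉ V →
              (acc.insert (pvTgt maps s d) (dv + 1)).get? k = none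
              ∨ (acc.insert (pvTgt maps s d) (dv + 1)).get? k = some (t + 1) := by
            intro k hk
            by_cases hkw : k = pvTgt maps s d
            · right; rw [hkw, PySem.Dict.get?_insert, if_pos rfl, hdvt]
            · rw [PySem.Dict.get?_insert, if_neg hkw]
              exact ha2 k hk
          have ha3' : (acc.insert (pvTgt maps s d) (dv + 1)).keys.Nodup :=
            PySem.Dict.nodup_keys_insert _ _ _ ha3
          obtain ⟨c1, c2, c3⟩ := ih hds' _ ha1' ha2' ha3'
          refine ⟨c1, ?_, c3⟩
          intro k hk
          obtain ⟨cn, ciff⟩ := c2 k hk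
          refine ⟨cn, ciff.trans ?_⟩
          constructor
          · rintro (h | ⟨d', hd', hp⟩)
            · by_cases hkw : k = pvTgt maps s d
              · exact Or.inr ⟨d, List.mem_cons_self .., hokP, hkw⟩
              · left
                rw [PySem.Dict.get?_insert, if_neg hkw] at h
                exact h
            · exact Or.inr ⟨d', List.mem_cons_of_mem _ hd', hp⟩
          · rintro (h | ⟨d', hd', hp⟩)
            · left
              by_cases hkw : k = pvTgt maps s d
              · rw [hkw, PySem.Dict.get?_insert, if_pos rfl]; rfl
              · rw [PySem.Dict.get?_insert, if_neg hkw]; exact h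
            · rcases List.mem_cons.mp hd' with rfl | hd''
              · left
                rw [hp.2, PySem.Dict.get?_insert, if_pos rfl]; rfl
              · exact Or.inr ⟨d', hd'', hp⟩

-- characterisation of the whole items fold of one sweep
theorem pvItemsFold (maps : List String) (n m : Int) (F V : List pvSt) (t : Int)
    (dist : PySem.Dict pvSt Int) (hInv : pvInv maps n m F V t dist) :
    ∀ (its : List (pvSt × Int)), (∀ p ∈ its, p.1 ∈ V ∧ dist.get? p.1 = some p.2) →
    ∀ (acc : PySem.Dict pvSt Int),
    (∀ k ∈ V, acc.get? k = dist.get? k) →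
    (∀ k : pvSt, k ∉ V → acc.get? k = none ∨ acc.get? k = some (t + 1)) →
    acc.keys.Nodup →
    (∀ k ∈ V, (its.foldl (fun new p => pvDirs.foldl (pvStepR maps n m p.1.1 p.1.2.1 p.1.2.2 p.2) new) acc).get? k = dist.get? k) ∧
    (∀ k : pvSt, k ∉ V →
      ((its.foldl (fun new p => pvDirs.foldl (pvStepR maps n m p.1.1 p.1.2.1 p.1.2.2 p.2) new) acc).get? k = none
        ∨ (its.foldl (fun new p => pvDirs.foldl (pvStepR maps n m p.1.1 p.1.2.1 p.1.2.2 p.2) new) acc).get? k = some (t + 1))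
      ∧ (((its.foldl (fun new p => pvDirs.foldl (pvStepR maps n m p.1.1 p.1.2.1 p.1.2.2 p.2) new) acc).get? k).isSome
          ↔ (acc.get? k).isSome ∨ ∃ p ∈ its, pvEdge maps n m p.1 k)) ∧
    (its.foldl (fun new p => pvDirs.foldl (pvStepR maps n m p.1.1 p.1.2.1 p.1.2.2 p.2) new) acc).keys.Nodup := by
  intro its
  induction its with
  | nil =>
    intro _ acc ha1 ha2 ha3
    exact ⟨ha1, fun k hk => ⟨ha2 k hk, by simp⟩, ha3⟩
  | cons p its ih =>
    intro hits acc ha1 ha2 ha3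
    rw [List.foldl_cons]
    obtain ⟨hpV, hpv⟩ := hits p (List.mem_cons_self ..)
    have hits' := fun q hq => hits q (List.mem_cons_of_mem _ hq)
    obtain ⟨c1, c2, c3⟩ := pvStepRFold maps n m F V t dist hInv p.1 hpV p.2 hpv pvDirs
      (fun d h => h) acc ha1 ha2 ha3
    obtain ⟨d1, d2, d3⟩ := ih hits' _ c1 (fun k hk => (c2 k hk).1) c3
    refine ⟨d1, ?_, d3⟩
    intro k hk
    obtain ⟨dn, diff⟩ := d2 k hk
    obtain ⟨-, ciff⟩ := c2 k hk
    refine ⟨dn, diff.trans ?_⟩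
    rw [ciff]
    constructor
    · rintro ((h | h) | ⟨q, hq, hqe⟩)
      · exact Or.inl h
      · exact Or.inr ⟨p, List.mem_cons_self .., h⟩
      · exact Or.inr ⟨q, List.mem_cons_of_mem _ hq, hqe⟩
    · rintro (h | ⟨q, hq, hqe⟩)
      · exact Or.inl (Or.inl h)
      · rcases List.mem_cons.mp hq with rfl | hq'
        · exact Or.inl (Or.inr hqe)
        · exact Or.inr ⟨q, hq', hqe⟩

-- the sweep: values on V are untouched, exactly the layer's fresh states appear with value t+1
theorem pvSweep (maps : List String) (n m : Int) (F V : List pvSt) (t : Int)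
    (dist : PySem.Dict pvSt Int) (hInv : pvInv maps n m F V t dist) :
    (∀ k ∈ V, (pvRelax maps n m dist).get? k = dist.get? k) ∧
    (∀ k : pvSt, k ∉ V →
      (pvRelax maps n m dist).get? k
        = if k ∈ pvDelta maps n m F V then some (t + 1) else none) ∧
    (pvRelax maps n m dist).size = dist.size + (pvDelta maps n m F V).length ∧
    pvInv maps n m (pvDelta maps n m F V) (V ++ pvDelta maps n m F V) (t + 1)
      (pvRelax maps n m dist) := by
  have hInv' := hInv
  obtain ⟨k1, k3, k4, k5, kn, kv, kf⟩ := hInv'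
  unfold pvRelax
  have hnoneV : ∀ k : pvSt, k ∉ V → dist.get? k = none := by
    intro k hk
    rw [PySem.Dict.get?_eq_none_iff_contains]
    cases hc : dist.contains k with
    | false => rfl
    | true => exact absurd ((k1 k).mp hc) hk
  have hits : ∀ p ∈ dist.items, p.1 ∈ V ∧ dist.get? p.1 = some p.2 := by
    intro p hp
    obtain ⟨a, b⟩ := p
    have hmemk : a ∈ dist.keys := PySem.Dict.mem_keys_of_mem_items dist hp
    have hcont : dist.contains a = true := (PySem.Dict.contains_iff_mem_keys dist a).mpr hmemk
    exact ⟨(k1 a).mp hcont, PySem.Dict.get?_of_mem_items dist hp kn⟩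
  obtain ⟨m1, m2, m3⟩ := pvItemsFold maps n m F V t dist hInv dist.items hits dist
    (fun _ _ => rfl) (fun k hk => Or.inl (hnoneV k hk)) kn
  obtain ⟨hDmem, hDnodup⟩ := pvDelta_mem_nodup maps n m F V
  have hVD : (V ++ pvDelta maps n m F V).Nodup := hDnodup kv
  have hdisj : ∀ z : pvSt, z ∈ V → z ∈ pvDelta maps n m F V → False := by
    intro z h1 h2
    exact (List.disjoint_of_nodup_append hVD) h1 h2
  have hDiff : ∀ w : pvSt, w ∉ V →
      (w ∈ pvDelta maps n m F V ↔ ∃ s ∈ F, pvEdge maps n m s w) := by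
    intro w hw
    constructor
    · intro h
      rcases (hDmem w).mp (List.mem_append.mpr (Or.inr h)) with h' | h'
      · exact absurd h' hw
      · exact h'
    · intro h
      rcases List.mem_append.mp ((hDmem w).mpr (Or.inr h)) with h' | h'
      · exact absurd h' hw
      · exact h'
  have hTC : ∀ k : pvSt, k ∉ V →
      ((∃ p ∈ dist.items, pvEdge maps n m p.1 k) ↔ ∃ s ∈ F, pvEdge maps n m s k) := by
    intro k hk
    constructor
    · rintro ⟨p, hp, he⟩
      obtain ⟨hpV, -⟩ := hits p hp
      by_cases hpF : p.1 ∈ F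
      · exact ⟨p.1, hpF, he⟩
      · exact absurd (k4 p.1 hpV hpF k he) hk
    · rintro ⟨s, hsF, he⟩
      have hsV := kf s hsF
      cases hg : dist.get? s with
      | none =>
        have hcont : dist.contains s = true := (k1 s).mpr hsV
        rw [PySem.Dict.contains_eq_isSome_get?, hg] at hcont
        cases hcont
      | some v => exact ⟨(s, v), PySem.Dict.mem_items_of_get?_eq_some dist hg, he⟩
  -- (2), proven first because everything else uses it
  have h2' : ∀ k : pvSt, k ∉ V →
      (dist.items.foldl (fun new p => pvDirs.foldl (pvStepR maps n m p.1.1 p.1.2.1 p.1.2.2 p.2) new) dist).get? k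
        = if k ∈ pvDelta maps n m F V then some (t + 1) else none := by
    intro k hk
    obtain ⟨hno, hiff⟩ := m2 k hk
    by_cases hkD : k ∈ pvDelta maps n m F V
    · rw [if_pos hkD]
      have hsm : ((dist.items.foldl (fun new p => pvDirs.foldl (pvStepR maps n m p.1.1 p.1.2.1 p.1.2.2 p.2) new) dist).get? k).isSome :=
        hiff.mpr (Or.inr ((hTC k hk).mpr ((hDiff k hk).mp hkD)))
      rcases hno with h | h
      · rw [h] at hsm; cases hsm
      · exact h
    · rw [if_neg hkD]
      cases hr : (dist.items.foldl (fun new p => pvDirs.foldl (pvStepR maps n m p.1.1 p.1.2.1 p.1.2.2 p.2) new) dist).get? k with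
      | none => rfl
      | some v =>
        have hsm : ((dist.items.foldl (fun new p => pvDirs.foldl (pvStepR maps n m p.1.1 p.1.2.1 p.1.2.2 p.2) new) dist).get? k).isSome := by
          rw [hr]; rfl
        rcases hiff.mp hsm with h | h
        · rw [hnoneV k hk] at h; cases h
        · exact absurd ((hDiff k hk).mpr ((hTC k hk).mp h)) hkD
  have hcontr : ∀ k : pvSt,
      ((dist.items.foldl (fun new p => pvDirs.foldl (pvStepR maps n m p.1.1 p.1.2.1 p.1.2.2 p.2) new) dist).contains k = true)
        ↔ k ∈ V ++ pvDelta maps n m F V := by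
    intro k
    rw [PySem.Dict.contains_eq_isSome_get?, List.mem_append]
    by_cases hkV : k ∈ V
    · rw [m1 k hkV]
      have hd : (dist.get? k).isSome = true := by
        rw [← PySem.Dict.contains_eq_isSome_get?]
        exact (k1 k).mpr hkV
      simp [hd, hkV]
    · by_cases hkD : k ∈ pvDelta maps n m F V
      · rw [h2' k hkV, if_pos hkD]
        simp [hkD]
      · rw [h2' k hkV, if_neg hkD]
        simp [hkV, hkD]
  have hsizes :
      (dist.items.foldl (fun new p => pvDirs.foldl (pvStepR maps n m p.1.1 p.1.2.1 p.1.2.2 p.2) new) dist).size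
        = dist.size + (pvDelta maps n m F V).length := by
    have hsz : ∀ d : PySem.Dict pvSt Int, d.size = d.keys.length := by
      intro d
      simp [PySem.Dict.keys, PySem.Dict.size]
    have hkd : ∀ k : pvSt, k ∈ dist.keys ↔ k ∈ V := by
      intro k
      exact (PySem.Dict.contains_iff_mem_keys dist k).symm.trans (k1 k)
    have hkr : ∀ k : pvSt,
        k ∈ (dist.items.foldl (fun new p => pvDirs.foldl (pvStepR maps n m p.1.1 p.1.2.1 p.1.2.2 p.2) new) dist).keys
          ↔ k ∈ V ++ pvDelta maps n m F V := by
      intro k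
      exact (PySem.Dict.contains_iff_mem_keys _ k).symm.trans (hcontr k)
    have hp1 : dist.keys.Perm V := (List.perm_ext_iff_of_nodup kn kv).mpr hkd
    have hp2 : (dist.items.foldl (fun new p => pvDirs.foldl (pvStepR maps n m p.1.1 p.1.2.1 p.1.2.2 p.2) new) dist).keys.Perm
        (V ++ pvDelta maps n m F V) := (List.perm_ext_iff_of_nodup m3 hVD).mpr hkr
    rw [hsz, hsz, hp1.length_eq, hp2.length_eq, List.length_append]
  refine ⟨m1, h2', hsizes, ?_, ?_, ?_, ?_, m3, hVD, ?_⟩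
  · -- k1'
    exact hcontr
  · -- k3'
    intro s hs
    rcases List.mem_append.mp hs with hsV | hsD
    · obtain ⟨kk, hkk, hkt, hkiff⟩ := k3 s hsV
      refine ⟨kk, by rw [m1 s hsV]; exact hkk, by omega, ?_⟩
      constructor
      · intro h
        exact absurd h (fun h' => hdisj s hsV h')
      · intro h
        exact absurd h (by omega)
    · have hsV' : s ∉ V := fun h => hdisj s h hsD
      refine ⟨t + 1, by rw [h2' s hsV', if_pos hsD], le_refl _, ?_⟩
      exact iff_of_true hsD rfl
  · -- k4'
    intro s hs hsnF w hw
    rcases List.mem_append.mp hs with hsV | hsD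
    · by_cases hsF : s ∈ F
      · by_cases hwV : w ∈ V
        · exact List.mem_append.mpr (Or.inl hwV)
        · exact List.mem_append.mpr (Or.inr ((hDiff w hwV).mpr ⟨s, hsF, hw⟩))
      · exact List.mem_append.mpr (Or.inl (k4 s hsV hsF w hw))
    · exact absurd hsD hsnF
  · -- k5'
    intro s hs w hw he a b ha hb
    rcases List.mem_append.mp hs with hsV | hsD
    · rcases List.mem_append.mp hw with hwV | hwD
      · rw [m1 s hsV] at ha
        rw [m1 w hwV] at hb
        exact k5 s hsV w hwV he a b ha hb
      · have hwV' : w ∉ V := fun h => hdisj w h hwD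
        have hsF : s ∈ F := by
          by_contra hsF
          exact hwV' (k4 s hsV hsF w he)
        obtain ⟨kk, hkk, -, hkiff⟩ := k3 s hsV
        have ha' : a = kk := by
          rw [m1 s hsV, hkk] at ha
          exact (Option.some.inj ha).symm
        have hbt : b = t + 1 := by
          rw [h2' w hwV', if_pos hwD] at hb
          exact (Option.some.inj hb).symm
        have hkt : kk = t := hkiff.mp hsF
        omega
    · have hsV' : s ∉ V := fun h => hdisj s h hsD
      have ha' : a = t + 1 := by
        rw [h2' s hsV', if_pos hsD] at ha
        exact (Option.some.inj ha).symm
      rcases List.mem_append.mp hw with hwV | hwD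
      · obtain ⟨kk, hkk, hkt, -⟩ := k3 w hwV
        have hb' : b = kk := by
          rw [m1 w hwV, hkk] at hb
          exact (Option.some.inj hb).symm
        omega
      · have hwV' : w ∉ V := fun h => hdisj w h hwD
        have hb' : b = t + 1 := by
          rw [h2' w hwV', if_pos hwD] at hb
          exact (Option.some.inj hb).symm
        omega
  · -- kf'
    exact fun s hs => List.mem_append.mpr (Or.inr hs)

-- shifting a layer when nothing fresh appeared
theorem pvInvShift (maps : List String) (n m : Int) (F V : List pvSt) (t : Int)
    (dist : PySem.Dict pvSt Int) (hInv : pvInv maps n m F V t dist)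
    (hD : pvDelta maps n m F V = []) : pvInv maps n m [] V (t + 1) dist := by
  obtain ⟨k1, k3, k4, k5, kn, kv, kf⟩ := hInv
  obtain ⟨hmem, -⟩ := pvDelta_mem_nodup maps n m F V
  refine ⟨k1, ?_, ?_, k5, kn, kv, by simp⟩
  · intro s hs
    obtain ⟨k, hk, hkt, -⟩ := k3 s hs
    exact ⟨k, hk, by omega, by simp; omega⟩
  · intro s hs _ w hw
    by_cases hsF : s ∈ F
    · have := (hmem w).mp
      by_cases hwV : w ∈ V
      · exact hwV
      · exfalso
        have : w ∈ V ++ pvDelta maps n m F V := (hmem w).mpr (Or.inr ⟨s, hsF, hw⟩)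
        rw [hD] at this
        simp at this
        exact hwV this
    · exact k4 s hs hsF w hw

theorem pvLoopB_eq_of_size (maps : List String) (n m : Int) (dist : PySem.Dict pvSt Int)
    (h : (pvRelax maps n m dist).size = dist.size) : pvLoopB maps n m dist = dist := by
  rw [pvLoopB, if_pos h]

theorem pvLoopB_eq_of_ne (maps : List String) (n m : Int) (dist : PySem.Dict pvSt Int)
    (h : (pvRelax maps n m dist).size ≠ dist.size) :
    pvLoopB maps n m dist = pvLoopB maps n m (pvRelax maps n m dist) := by
  rw [pvLoopB, if_neg h]

-- once recorded, a distance survives the rest of the sweep loop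
theorem pvPreserve (maps : List String) (n m : Int) :
    ∀ (dist : PySem.Dict pvSt Int) (F V : List pvSt) (t : Int),
    pvInv maps n m F V t dist →
    ∀ s ∈ V, (pvLoopB maps n m dist).get? s = dist.get? s := by
  intro dist
  induction dist using pvLoopB.induct maps n m with
  | case1 dist hsz =>
    intro F V t hInv s hs
    rw [pvLoopB_eq_of_size maps n m dist hsz]
  | case2 dist hsz ih =>
    intro F V t hInv s hs
    obtain ⟨h1, h2, h3, h4⟩ := pvSweep maps n m F V t dist hInv
    rw [pvLoopB_eq_of_ne maps n m dist hsz]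
    have hs' : s ∈ V ++ pvDelta maps n m F V := by simp [hs]
    rw [ih (pvDelta maps n m F V) (V ++ pvDelta maps n m F V) (t + 1) h4 s hs']
    exact h1 s hs

-- main lemma: layered BFS result = fixpoint dictionary lookup
theorem pvBfsB_loop (maps : List String) (n m ey ex : Int) :
    ∀ (F V : List pvSt) (t : Int) (dist : PySem.Dict pvSt Int),
    pvInv maps n m F V t dist →
    ((ey, ex, (1:Int)) ∈ V → (ey, ex, (1:Int)) ∈ F) →
    pvBfsB maps n m ey ex F V t = ((pvLoopB maps n m dist).get? (ey, ex, 1)).getD (-1) := by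
  intro F V t
  induction F, V, t using pvBfsB.induct maps n m ey ex with
  | case1 V t =>
    intro dist hInv hg
    obtain ⟨h1, h2, h3, h4⟩ := pvSweep maps n m [] V t dist hInv
    have hD : pvDelta maps n m ([] : List pvSt) V = [] := rfl
    rw [pvBfsB]
    simp only [if_pos rfl]
    rw [pvLoopB_eq_of_size maps n m dist (by rw [h3, hD]; simp)]
    have hgV : (ey, ex, (1:Int)) ∉ V := fun h => by simpa using hg h
    have : dist.get? (ey, ex, 1) = none := by
      rw [PySem.Dict.get?_eq_none_iff_contains]
      cases hc : dist.contains (ey, ex, (1:Int)) with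
      | false => rfl
      | true => exact absurd ((hInv.1 _).mp hc) hgV
    rw [this]; rfl
  | case2 F V t hne hmem =>
    intro dist hInv hg
    rw [pvBfsB, if_neg hne, if_pos hmem]
    have hc := hInv
    obtain ⟨k1, k3, -, -, -, -, kf⟩ := hc
    obtain ⟨k, hk, -, hiff⟩ := k3 _ (kf _ hmem)
    have hkt : k = t := hiff.mp hmem
    rw [pvPreserve maps n m dist F V t hInv _ (kf _ hmem), hk, hkt]
    rfl
  | case3 F V t hne hnm ih =>
    intro dist hInv hg
    have hgV : (ey, ex, (1:Int)) ∉ V := fun h => hnm (hg h)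
    obtain ⟨h1, h2, h3, h4⟩ := pvSweep maps n m F V t dist hInv
    rw [pvBfsB, if_neg hne, if_neg hnm]
    simp only [pvExpandB_delta maps n m F [] V, List.nil_append] at ih ⊢
    by_cases hD : pvDelta maps n m F V = []
    · -- nothing fresh: the sweep loop stops now, the BFS dies in one more round
      rw [pvLoopB_eq_of_size maps n m dist (by rw [h3, hD]; simp)]
      have hInv' := pvInvShift maps n m F V t dist hInv hD
      rw [hD]
      have : pvBfsB maps n m ey ex [] (V ++ []) (t + 1) = -1 := by rw [pvBfsB]; simp
      rw [this]
      have hnone : dist.get? (ey, ex, 1) = none := by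
        rw [PySem.Dict.get?_eq_none_iff_contains]
        cases hc : dist.contains (ey, ex, (1:Int)) with
        | false => rfl
        | true => exact absurd ((hInv.1 _).mp hc) hgV
      rw [hnone]; rfl
    · rw [pvLoopB_eq_of_ne maps n m dist
        (by rw [h3]; have : (pvDelta maps n m F V).length ≠ 0 := by
              simpa [List.length_eq_zero_iff] using hD
            omega)]
      apply ih (pvRelax maps n m dist) h4
      intro hmem'
      rcases List.mem_append.mp hmem' with h | h
      · exact absurd h hgV
      · exact h

-- the initial dictionary {start: 0} satisfies the invariant
theorem pvInv_init (maps : List String) (n m sy sx : Int) :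
    pvInv maps n m [(sy, sx, 0)] [(sy, sx, 0)] 0
      (PySem.Dict.empty.insert (sy, sx, 0) 0) := by
  refine ⟨?_, ?_, ?_, ?_, ?_, ?_, ?_⟩
  · intro s
    rw [PySem.Dict.contains_insert]
    constructor
    · intro h
      rcases Bool.or_eq_true_iff.mp h with h | h
      · simp only [List.mem_singleton]
        exact (beq_iff_eq ..).mp h
      · rw [PySem.Dict.contains_empty] at h; cases h
    · intro h
      rcases List.mem_singleton.mp h with rfl
      simp
  · intro s hs
    rcases List.mem_singleton.mp hs with rfl
    exact ⟨0, by simp [PySem.Dict.get?_insert_self], le_refl 0, by simp⟩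
  · intro s hs hns
    exact absurd hs hns
  · intro s hs w hw _ a b ha hb
    rcases List.mem_singleton.mp hs with rfl
    rcases List.mem_singleton.mp hw with heq
    rw [heq] at hb
    rw [PySem.Dict.get?_insert_self] at ha hb
    simp at ha hb
    omega
  · have h0 : (PySem.Dict.empty : PySem.Dict pvSt Int).keys.Nodup := PySem.Dict.nodup_keys_empty
    exact PySem.Dict.nodup_keys_insert _ _ _ h0
  · simp
  · simp

-- A = B, assembled
theorem solution_eq_alt (maps : List String) : solution maps = solution_alt maps := by
  unfold solution solution_alt
  dsimp only
  rw [pvScanA_eq]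
  dsimp only
  set n : Int := (maps.length : Int) with hn
  set m : Int := PySem.Str.len ((PySem.List.pyGet? maps 0).getD "") with hm
  set ss := pvFindAll maps n m 'S' with hss
  set es := pvFindAll maps n m 'E' with hes
  by_cases hS : ss = []
  · simp [hS]
  · by_cases hE : es = []
    · simp [hE]
    · have hSmem := pvFindAll_nonneg maps n m 'S' (ss.getLastD (-1, -1)) (pvGetLastD_mem _ _ hS)
      have hEmem := pvFindAll_nonneg maps n m 'E' (es.getLastD (-1, -1)) (pvGetLastD_mem _ _ hE)
      have hcond : ¬((ss.getLastD (-1, -1)).1 = -1 ∨ (es.getLastD (-1, -1)).1 = -1) := by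
        push_neg
        constructor <;> omega
      rw [if_neg hcond, if_neg (by tauto : ¬(ss = [] ∨ es = []))]
      set sy := (ss.getLastD (-1, -1)).1
      set sx := (ss.getLastD (-1, -1)).2
      set ey := (es.getLastD (-1, -1)).1
      set ex := (es.getLastD (-1, -1)).2
      have hrel : pvVisRel (pvMark (fun _ _ _ => false) sy sx 0) [(sy, sx, 0)] := by
        have h0 : pvVisRel (fun _ _ _ => false) [] := by intro y x l; simp
        simpa using pvVisRel_mark (fun _ _ _ => false) [] sy sx 0 h0
      have hA : pvBfsA maps n m ey ex [(sy, sx, 0, 0)] (pvMark (fun _ _ _ => false) sy sx 0)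
          = pvBfsB maps n m ey ex [(sy, sx, 0)] [(sy, sx, 0)] 0 :=
        pvBfsAB maps n m ey ex [(sy, sx, 0)] [(sy, sx, 0)] 0 _ hrel
      rw [hA, pvBfsB_loop maps n m ey ex [(sy, sx, 0)] [(sy, sx, 0)] 0
            (PySem.Dict.empty.insert (sy, sx, 0) 0) (pvInv_init maps n m sy sx)
            (fun h => h),
          PySem.Dict.getD_eq_get?_getD]

-- ===== VERDICT (by name: the statement is the Claim_ definition above) =====
theorem solution_spec : Claim_equal_solution := by
  intro maps _ _
  unfold Spec_solution
  exact solution_eq_alt maps
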